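-- pv_equiv track=rewrite | github.com/FlorianMiceli/advent-of-code | 2023/03/03.py | lign_to_numbers
-- ===== SOURCE A (Python) =====
-- def lign_to_numbers(line, posOfDigits):
--     numbers = []
--     for i in range(len(posOfDigits)):
--         if i == 0 :
--             numbers.append(line[posOfDigits[i]])
--         elif posOfDigits[i] == posOfDigits[i-1]+1 :
--             numbers[-1] += line[posOfDigits[i]]
--         else :
--             numbers.append(line[posOfDigits[i]])
--     return numbers
-- ===== SOURCE B (Python) =====
-- def lign_to_numbers(line, posOfDigits):
--     # Recursive grouping: split the positions into maximal runs of consecutive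
--     # integers (built back-to-front), then render each run as a substring.
--     def runs(ps):
--         if not ps:
--             return []
--         rest = runs(ps[1:])
--         if rest and rest[0][0] == ps[0] + 1:
--             return [[ps[0]] + rest[0]] + rest[1:]
--         return [[ps[0]]] + rest
--     return [''.join(line[p] for p in r) for r in runs(posOfDigits)]
-- ===== Notes on version B (the rewrite author's own statement) =====
-- stated objective: alternative
-- what changed: Replaces A's single stateful scan that appends-or-extends the last accumulated string with a recursive back-to-front grouping of positions into maximal consecutive runs followed by a join of each run.
import Mathlib
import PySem

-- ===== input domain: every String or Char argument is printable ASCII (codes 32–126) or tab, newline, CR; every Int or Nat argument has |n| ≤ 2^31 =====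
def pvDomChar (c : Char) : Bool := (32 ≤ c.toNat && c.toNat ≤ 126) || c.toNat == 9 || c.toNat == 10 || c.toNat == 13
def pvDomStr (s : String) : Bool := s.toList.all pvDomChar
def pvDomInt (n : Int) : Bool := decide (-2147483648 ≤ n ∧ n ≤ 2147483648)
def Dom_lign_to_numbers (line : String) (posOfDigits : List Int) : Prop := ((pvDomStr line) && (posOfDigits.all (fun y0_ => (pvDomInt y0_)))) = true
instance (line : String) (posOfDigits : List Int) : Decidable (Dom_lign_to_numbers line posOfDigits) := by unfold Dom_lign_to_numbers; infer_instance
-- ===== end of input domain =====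

-- B replaces A's stateful append-or-extend scan by a recursive back-to-front grouping of
-- the positions into maximal consecutive runs, each then joined into a substring (alternative).


-- ===== PORT A =====
-- line[p] as a one-character string; "" only occurs off Pre_ (Python raises IndexError there)
def pvCharAt (line : String) (p : Int) : String :=
  match PySem.Str.pyGet? line p with
  | some c => String.singleton c
  | none => ""

def lign_to_numbers (line : String) (posOfDigits : List Int) : List String :=
  (List.range posOfDigits.length).foldl
    (fun numbers i =>
      if i == 0 then
        numbers ++ [pvCharAt line (posOfDigits.getD i 0)]
      else if posOfDigits.getD i 0 == posOfDigits.getD (i - 1) 0 + 1 then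
        numbers.dropLast ++ [numbers.getLastD "" ++ pvCharAt line (posOfDigits.getD i 0)]
      else
        numbers ++ [pvCharAt line (posOfDigits.getD i 0)])
    []

-- ===== PORT B =====
-- one recursion step of Source B's `runs`: prepend ps[0], merging with the first run if consecutive
def pvStep (p : Int) (rest : List (List Int)) : List (List Int) :=
  match rest with
  | (q :: r) :: rs => if q == p + 1 then (p :: q :: r) :: rs else [p] :: (q :: r) :: rs
  | _ => [p] :: rest

def pvRuns : List Int → List (List Int)
  | [] => []
  | p :: ps => pvStep p (pvRuns ps)

def lign_to_numbers_alt (line : String) (posOfDigits : List Int) : List String :=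
  (pvRuns posOfDigits).map (fun r => PySem.Str.join "" (r.map (pvCharAt line)))

-- ===== PRECONDITION & SPEC =====
-- Pre_ excludes exactly the inputs where Python's line[p] raises IndexError for some position p.
def Pre_lign_to_numbers (line : String) (posOfDigits : List Int) : Prop :=
  ∀ p ∈ posOfDigits, PySem.Raise.InRange line.toList.length p
instance (line : String) (posOfDigits : List Int) : Decidable (Pre_lign_to_numbers line posOfDigits) := by unfold Pre_lign_to_numbers; infer_instance
def pvWitness_lign_to_numbers : String × List Int := ("467..114", [0, 1, 2, 5, 6, 7])

def Spec_lign_to_numbers (line : String) (posOfDigits : List Int) (out : List String) : Prop := out = lign_to_numbers_alt line posOfDigits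
instance (line : String) (posOfDigits : List Int) (out : List String) : Decidable (Spec_lign_to_numbers line posOfDigits out) := by unfold Spec_lign_to_numbers; infer_instance

-- ===== CLAIM (what is proved, stated in full; the proofs are below) =====
def Claim_equal_lign_to_numbers : Prop := ∀ (line : String) (posOfDigits : List Int), Dom_lign_to_numbers line posOfDigits → Pre_lign_to_numbers line posOfDigits → Spec_lign_to_numbers line posOfDigits (lign_to_numbers line posOfDigits)

-- ===== LEMMAS AND PROOFS =====
theorem pvRuns_cons_shape (p : Int) (ps : List Int) :
    ∃ r rs, pvRuns (p :: ps) = (p :: r) :: rs := by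
  show ∃ r rs, pvStep p (pvRuns ps) = (p :: r) :: rs
  unfold pvStep
  match pvRuns ps with
  | [] => exact ⟨[], [], rfl⟩
  | [] :: rs => exact ⟨[], [] :: rs, rfl⟩
  | (q :: r) :: rs =>
    by_cases h : q == p + 1 <;> simp [h]

theorem join_nil_concat (l : List (List Char)) : PySem.Chars.join [] l = l.flatten := by
  induction l with
  | nil => simp [PySem.Chars.join_nil]
  | cons a t ih =>
    cases t with
    | nil => simp [PySem.Chars.join_singleton]
    | cons b u => simp [PySem.Chars.join_cons_cons] at ih ⊢; simpa using ih

theorem pvRuns_snoc (xs : List Int) (x : Int) (h : xs ≠ []) :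
    pvRuns (xs ++ [x]) =
      if x = xs.getLast h + 1 then
        (pvRuns xs).dropLast ++ [(pvRuns xs).getLastD [] ++ [x]]
      else pvRuns xs ++ [[x]] := by
  induction xs with
  | nil => exact absurd rfl h
  | cons p ps ih =>
    cases ps with
    | nil =>
      show pvStep p (pvStep x (pvRuns [])) = _
      simp only [pvRuns, pvStep, List.getLast_singleton]
      by_cases hx : x = p + 1
      · simp [hx]
      · have : (x == p + 1) = false := by simpa using hx
        simp [this, hx]
    | cons q qs =>
      have hps : (q :: qs : List Int) ≠ [] := by simp
      have ihs := ih hps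
      obtain ⟨r, rs, hshape⟩ := pvRuns_cons_shape q qs
      have hlast : (p :: q :: qs).getLast h = (q :: qs).getLast hps := by
        simp [List.getLast_cons]
      have hP : pvRuns (p :: q :: qs) = pvStep p ((q :: r) :: rs) := by
        show pvStep p (pvRuns (q :: qs)) = _
        rw [hshape]
      rw [hlast]
      show pvStep p (pvRuns ((q :: qs) ++ [x])) = _
      rw [ihs, hP]
      by_cases hx : x = (q :: qs).getLast hps + 1
      · rw [if_pos hx, if_pos hx, hshape]
        by_cases hq : q = p + 1
        · have hq' : (q == p + 1) = true := by simpa using hq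
          cases rs with
          | nil => simp [pvStep, hq']
          | cons s ss => simp [pvStep, hq']
        · have hq' : (q == p + 1) = false := by simpa using hq
          cases rs with
          | nil => simp [pvStep, hq']
          | cons s ss => simp [pvStep, hq']
      · rw [if_neg hx, if_neg hx, hshape]
        by_cases hq : q = p + 1
        · have hq' : (q == p + 1) = true := by simpa using hq
          simp [pvStep, hq']
        · have hq' : (q == p + 1) = false := by simpa using hq
          simp [pvStep, hq']

theorem foldA_frozen (line : String) (xs : List Int) (x : Int) :
    lign_to_numbers line xs =
      (List.range xs.length).foldl
        (fun numbers i =>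
          if i == 0 then
            numbers ++ [pvCharAt line ((xs ++ [x]).getD i 0)]
          else if (xs ++ [x]).getD i 0 == (xs ++ [x]).getD (i - 1) 0 + 1 then
            numbers.dropLast ++ [numbers.getLastD "" ++ pvCharAt line ((xs ++ [x]).getD i 0)]
          else
            numbers ++ [pvCharAt line ((xs ++ [x]).getD i 0)])
        [] := by
  unfold lign_to_numbers
  apply PySem.List.foldl_congr_mem
  intro acc i hi
  have hi' : i < xs.length := List.mem_range.mp hi
  have h1 : (xs ++ [x]).getD i 0 = xs.getD i 0 := List.getD_append _ _ _ _ hi'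
  have h2 : (xs ++ [x]).getD (i - 1) 0 = xs.getD (i - 1) 0 :=
    List.getD_append _ _ _ _ (by omega)
  rw [h1, h2]

theorem join_map_singleton (line : String) (r : List Int) (x : Int) :
    PySem.Str.join "" ((r ++ [x]).map (pvCharAt line)) =
      PySem.Str.join "" (r.map (pvCharAt line)) ++ pvCharAt line x := by
  apply String.toList_injective
  simp [PySem.Str.toList_join, join_nil_concat, String.toList_append, List.map_map]

theorem join_one (s : String) : PySem.Str.join "" [s] = s := by
  apply String.toList_injective
  simp [PySem.Str.toList_join, PySem.Chars.join_singleton]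

theorem main_eq (line : String) (xs : List Int) :
    lign_to_numbers line xs = lign_to_numbers_alt line xs := by
  induction xs using List.reverseRecOn with
  | nil => rfl
  | append_singleton ys x ih =>
    have hlen : (ys ++ [x]).length = ys.length + 1 := by simp
    have hstep : lign_to_numbers line (ys ++ [x]) =
        (let numbers := lign_to_numbers line ys
         let n := ys.length
         if n == 0 then
           numbers ++ [pvCharAt line ((ys ++ [x]).getD n 0)]
         else if (ys ++ [x]).getD n 0 == (ys ++ [x]).getD (n - 1) 0 + 1 then
           numbers.dropLast ++ [numbers.getLastD "" ++ pvCharAt line ((ys ++ [x]).getD n 0)]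
         else
           numbers ++ [pvCharAt line ((ys ++ [x]).getD n 0)]) := by
      conv_lhs => unfold lign_to_numbers
      rw [hlen, List.range_succ, List.foldl_append]
      rw [← foldA_frozen line ys x]
      simp only [List.foldl_cons, List.foldl_nil]
    rw [hstep]
    have hx : (ys ++ [x]).getD ys.length 0 = x := by
      rw [List.getD_eq_getElem?_getD]; simp
    cases ys with
    | nil =>
      simp only [hx]
      show [pvCharAt line x] = lign_to_numbers_alt line [x]
      unfold lign_to_numbers_alt
      simp [pvRuns, pvStep, join_one]
    | cons y yt =>
      have hne : (y :: yt : List Int) ≠ [] := by simp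
      have hn0 : ((y :: yt).length == 0) = false := by simp
      have hprev : ((y :: yt) ++ [x]).getD ((y :: yt).length - 1) 0 = (y :: yt).getLast hne := by
        rw [List.getD_eq_getElem?_getD]
        rw [List.getElem?_append_left (by simp)]
        rw [List.getLast_eq_getElem]
        simp
        rfl
      simp only [hn0, Bool.false_eq_true, if_false, hx, hprev]
      unfold lign_to_numbers_alt
      rw [pvRuns_snoc (y :: yt) x hne]
      have hruns_ne : pvRuns (y :: yt) ≠ [] := by
        obtain ⟨r, rs, hs⟩ := pvRuns_cons_shape y yt
        simp [hs]
      by_cases hc : x = (y :: yt).getLast hne + 1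
      · have hc' : (x == (y :: yt).getLast hne + 1) = true := by simpa using hc
        rw [hc', if_pos hc]
        simp only [if_true]
        rw [List.map_append, ih]
        unfold lign_to_numbers_alt
        rw [← List.map_dropLast]
        congr 1
        -- last strings
        have hlast_map : ((pvRuns (y :: yt)).map (fun r => PySem.Str.join "" (r.map (pvCharAt line)))).getLastD ""
            = PySem.Str.join "" (((pvRuns (y :: yt)).getLast hruns_ne).map (pvCharAt line)) := by
          rw [List.getLastD_eq_getLast?, List.getLast?_eq_some_getLast (by simpa using hruns_ne)]
          simp [List.getLast_map]
        rw [hlast_map]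
        have hlastD : (pvRuns (y :: yt)).getLastD [] = (pvRuns (y :: yt)).getLast hruns_ne := by
          rw [List.getLastD_eq_getLast?, List.getLast?_eq_some_getLast hruns_ne]
          rfl
        rw [hlastD]
        simp only [List.map_cons, List.map_nil, join_map_singleton]
      · have hc' : (x == (y :: yt).getLast hne + 1) = false := by simpa using hc
        rw [hc', if_neg hc]
        simp only [Bool.false_eq_true, if_false]
        rw [List.map_append, ih]
        unfold lign_to_numbers_alt
        congr 1
        simp [join_one]

-- ===== VERDICT (by name: the statement is the Claim_ definition above) =====
theorem lign_to_numbers_spec : Claim_equal_lign_to_numbers := by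
  intro line pos _ _
  unfold Spec_lign_to_numbers
  exact main_eq line pos
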